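-- pv_equiv track=rewrite | github.com/adam444555/kindly-web-search-mcp-server | src/mcp_server_web_search_advanced_scraping/scrape/universal_loader.py | _biorxiv_pick_pdf_key
-- ===== SOURCE A (Python) =====
-- def _biorxiv_pick_pdf_key(keys: list[str], doi: str | None) -> str | None:
--     pdfs = [k for k in keys if k.lower().endswith(".pdf")]
--     if not pdfs:
--         return None
--
--     doi_suffix = doi.split("/")[-1] if doi else ""
--
--     def score(k: str) -> tuple[int, int]:
--         s = 0
--         if "/content/" in k:
--             s += 2
--         if doi_suffix and doi_suffix in k:
--             s += 1
--         if "supp" in k.lower():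
--             s -= 1
--         return (-s, len(k))
--
--     return sorted(pdfs, key=score)[0]
-- ===== SOURCE B (Python) =====
-- def _biorxiv_pick_pdf_key(keys: list[str], doi: str | None) -> str | None:
--     doi_suffix = doi.split("/")[-1] if doi else ""
--
--     def score(k: str) -> tuple[int, int]:
--         s = 0
--         if "/content/" in k:
--             s += 2
--         if doi_suffix and doi_suffix in k:
--             s += 1
--         if "supp" in k.lower():
--             s -= 1
--         return (-s, len(k))
--
--     best_key = None
--     best_score = None
--     for k in keys:
--         if not k.lower().endswith(".pdf"):
--             continue
--         sc = score(k)
--         if best_score is None or sc < best_score: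
--             best_key, best_score = k, sc
--     return best_key
-- ===== Notes on version B (the rewrite author's own statement) =====
-- stated objective: alternative
-- what changed: Replaces the filter-then-sort-and-take-head pipeline with a single pass over keys that tracks the best PDF key and its score tuple, updating only on strictly smaller scores so ties keep the earliest key.
import Mathlib
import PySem

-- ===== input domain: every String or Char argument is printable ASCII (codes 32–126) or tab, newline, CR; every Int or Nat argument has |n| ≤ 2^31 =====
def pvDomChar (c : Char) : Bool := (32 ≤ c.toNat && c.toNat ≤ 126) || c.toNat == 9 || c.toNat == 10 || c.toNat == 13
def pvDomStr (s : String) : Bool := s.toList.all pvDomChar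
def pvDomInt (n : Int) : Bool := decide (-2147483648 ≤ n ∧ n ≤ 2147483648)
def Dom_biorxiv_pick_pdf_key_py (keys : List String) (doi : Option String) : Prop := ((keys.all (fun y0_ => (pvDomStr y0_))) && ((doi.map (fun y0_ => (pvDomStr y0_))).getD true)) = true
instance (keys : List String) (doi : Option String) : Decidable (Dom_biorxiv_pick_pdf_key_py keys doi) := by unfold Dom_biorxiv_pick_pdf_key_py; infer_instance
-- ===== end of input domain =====

-- B replaces A's filter-then-stable-sort-and-take-head with a single pass over `keys`
-- tracking the best-scored PDF key (strict-< update keeps the earliest key on ties);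
-- same scoring, same result, no intermediate list (objective: alternative).


-- shared helpers (both Pythons contain this identical doi_suffix / score code)
-- doi.split("/")[-1] if doi else ""  — split on "/" is always some and nonempty, so the getD defaults never fire
def pvDoiSuffix (doi : Option String) : String :=
  match doi with
  | none => ""
  | some d =>
    if d = "" then ""
    else (PySem.List.pyGet? ((PySem.Str.split? d "/").getD []) (-1)).getD ""

-- the integer s built by the score() helper
def pvScoreS (doi_suffix k : String) : Int :=
  let s : Int := 0
  let s := if PySem.Str.isIn "/content/" k then s + 2 else s
  let s := if doi_suffix ≠ "" ∧ PySem.Str.isIn doi_suffix k then s + 1 else s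
  let s := if PySem.Str.isIn "supp" (PySem.Str.lower k) then s - 1 else s
  s

-- ===== PORT A =====
def biorxiv_pick_pdf_key_py (keys : List String) (doi : Option String) : Option String :=
  let pdfs := keys.filter (fun k => PySem.Str.endswith (PySem.Str.lower k) ".pdf")
  if pdfs = [] then none
  else
    let ds := pvDoiSuffix doi
    -- sorted(pdfs, key=score)[0]; score k = (-s, len k); [0] on the nonempty sort result
    (PySem.List.sorted2 pdfs (fun k => -(pvScoreS ds k)) (fun k => PySem.Str.len k)).head?

-- ===== PORT B =====
def biorxiv_pick_pdf_key_py_alt (keys : List String) (doi : Option String) : Option String :=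
  let ds := pvDoiSuffix doi
  (keys.foldl
    (fun (best : Option (String × Int × Int)) k =>
      if ¬ PySem.Str.endswith (PySem.Str.lower k) ".pdf" then best
      else
        let sc : Int × Int := (-(pvScoreS ds k), PySem.Str.len k)
        match best with
        | none => some (k, sc)
        | some (bk, bsc) =>
          if sc.1 < bsc.1 ∨ (sc.1 = bsc.1 ∧ sc.2 < bsc.2) then some (k, sc)
          else some (bk, bsc))
    none).map (fun p => p.1)

-- ===== PRECONDITION & SPEC =====
def Spec_biorxiv_pick_pdf_key_py (keys : List String) (doi : Option String) (out : Option String) : Prop := out = biorxiv_pick_pdf_key_py_alt keys doi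
instance (keys : List String) (doi : Option String) (out : Option String) : Decidable (Spec_biorxiv_pick_pdf_key_py keys doi out) := by unfold Spec_biorxiv_pick_pdf_key_py; infer_instance

-- ===== CLAIM (what is proved, stated in full; the proofs are below) =====
def Claim_equal_biorxiv_pick_pdf_key_py : Prop := ∀ (keys : List String) (doi : Option String), Dom_biorxiv_pick_pdf_key_py keys doi → Spec_biorxiv_pick_pdf_key_py keys doi (biorxiv_pick_pdf_key_py keys doi)

-- ===== LEMMAS AND PROOFS =====

-- B's loop body once the pdf test has passed
def pvStep (ds : String) (best : Option (String × Int × Int)) (k : String) : Option (String × Int × Int) :=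
  let sc : Int × Int := (-(pvScoreS ds k), PySem.Str.len k)
  match best with
  | none => some (k, sc)
  | some (bk, bsc) =>
    if sc.1 < bsc.1 ∨ (sc.1 = bsc.1 ∧ sc.2 < bsc.2) then some (k, sc)
    else some (bk, bsc)

-- the comparison sorted2 inserts with
def pvBefore (ds : String) (a b : String) : Bool :=
  decide (-(pvScoreS ds a) < -(pvScoreS ds b)) ||
    (!decide (-(pvScoreS ds b) < -(pvScoreS ds a)) && decide (PySem.Str.len a < PySem.Str.len b))

theorem head_insertBy_nil (ds : String) (x : String) :
    (PySem.List.insertBy (pvBefore ds) x []).head? = some x := rfl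

theorem head_insertBy_cons (ds : String) (x h : String) (t : List String) :
    (PySem.List.insertBy (pvBefore ds) x (h :: t)).head? =
      if pvBefore ds x h then some x else some h := by
  simp only [PySem.List.insertBy]
  split <;> simp_all

theorem pvBefore_iff (ds x h : String) :
    pvBefore ds x h = true ↔
      (-(pvScoreS ds x) < -(pvScoreS ds h) ∨
        (-(pvScoreS ds x) = -(pvScoreS ds h) ∧ PySem.Str.len x < PySem.Str.len h)) := by
  simp only [pvBefore, Bool.or_eq_true, Bool.and_eq_true, Bool.not_eq_true',
    decide_eq_true_iff, decide_eq_false_iff_not]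
  omega

-- the invariant: B's fold state is the head of the sorted2 accumulation, paired with its score
theorem fold_eq_head (ds : String) (l : List String) :
    l.foldl (pvStep ds) none =
      (l.foldl (fun acc x => PySem.List.insertBy (pvBefore ds) x acc) []).head?.map
        (fun h => (h, -(pvScoreS ds h), PySem.Str.len h)) := by
  induction l using List.reverseRecOn with
  | nil => rfl
  | append_singleton l x ih =>
    rw [List.foldl_append, List.foldl_append]
    simp only [List.foldl_cons, List.foldl_nil, ih]
    cases hl : l.foldl (fun acc x => PySem.List.insertBy (pvBefore ds) x acc) [] with
    | nil => rw [head_insertBy_nil]; rfl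
    | cons h t =>
      rw [head_insertBy_cons, List.head?_cons, Option.map_some]
      by_cases hb : pvBefore ds x h = true
      · have hc := (pvBefore_iff ds x h).mp hb
        rw [if_pos hb, Option.map_some]
        simp only [pvStep]
        rw [if_pos hc]
      · have hc : ¬ (-(pvScoreS ds x) < -(pvScoreS ds h) ∨
            (-(pvScoreS ds x) = -(pvScoreS ds h) ∧ PySem.Str.len x < PySem.Str.len h)) :=
          fun hc => hb ((pvBefore_iff ds x h).mpr hc)
        rw [if_neg hb, Option.map_some]
        simp only [pvStep]
        rw [if_neg hc]

theorem foldl_skip {α β : Type} (p : α → Bool) (f : β → α → β) (l : List α) :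
    ∀ init, l.foldl (fun b k => if ¬ p k = true then b else f b k) init
      = (l.filter p).foldl f init := by
  induction l with
  | nil => intro init; rfl
  | cons h t ih =>
    intro init
    by_cases hp : p h = true
    · rw [List.foldl_cons, List.filter_cons_of_pos hp, List.foldl_cons, if_neg (by simp [hp]), ih]
    · rw [List.foldl_cons, List.filter_cons_of_neg (by simp_all), if_pos (by simp_all), ih]

theorem sorted2_eq_foldl (ds : String) (l : List String) :
    PySem.List.sorted2 l (fun k => -(pvScoreS ds k)) (fun k => PySem.Str.len k) =
      l.foldl (fun acc x => PySem.List.insertBy (pvBefore ds) x acc) [] := rfl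

theorem pv_main (keys : List String) (doi : Option String) :
    biorxiv_pick_pdf_key_py keys doi =
      (keys.foldl (fun b k => if ¬ PySem.Str.endswith (PySem.Str.lower k) ".pdf" = true then b
          else pvStep (pvDoiSuffix doi) b k) none).map (fun p => p.1) := by
  rw [foldl_skip, fold_eq_head, Option.map_map]
  simp only [biorxiv_pick_pdf_key_py, sorted2_eq_foldl]
  by_cases hp : keys.filter (fun k => PySem.Str.endswith (PySem.Str.lower k) ".pdf") = []
  · rw [if_pos hp, hp]; rfl
  · rw [if_neg hp]
    cases (keys.filter (fun k => PySem.Str.endswith (PySem.Str.lower k) ".pdf")).foldl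
        (fun acc x => PySem.List.insertBy (pvBefore (pvDoiSuffix doi)) x acc) [] |>.head? <;> rfl

theorem biorxiv_pick_pdf_key_py_spec : Claim_equal_biorxiv_pick_pdf_key_py := by
  intro keys doi _
  exact pv_main keys doi
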